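-- pv_equiv track=rewrite | github.com/paulwxq/nl2sql_v3 | src/metaweave/core/metadata/profiler.py | _infer_datetime_grain
-- ===== SOURCE A (Python) =====
-- from typing import Dict, List, Optional, Tuple
--
-- def _infer_datetime_grain(column_name: str) -> Optional[str]:
--     mapping = {
--         "_year": "year",
--         "_quarter": "quarter",
--         "_month": "month",
--         "_week": "week",
--         "_day": "day",
--         "_date": "day",
--         "_hour": "hour",
--         "_minute": "minute",
--     }
--     for suffix, grain in mapping.items():
--         if column_name.endswith(suffix):
--             return grain
--     return None
-- ===== SOURCE B (Python) =====
-- _GRAIN_BY_TAIL = {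
--     "_year": "year",
--     "_quarter": "quarter",
--     "_month": "month",
--     "_week": "week",
--     "_day": "day",
--     "_date": "day",
--     "_hour": "hour",
--     "_minute": "minute",
-- }
--
-- def _infer_datetime_grain(column_name: str):
--     idx = column_name.rfind("_")
--     if idx == -1:
--         return None
--     return _GRAIN_BY_TAIL.get(column_name[idx:])
-- ===== Notes on version B (the rewrite author's own statement) =====
-- stated objective: idiomatic
-- what changed: B extracts the underscore tail once with rfind and does a single dict lookup instead of A's linear endswith scan over all eight suffix candidates.
import Mathlib
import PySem

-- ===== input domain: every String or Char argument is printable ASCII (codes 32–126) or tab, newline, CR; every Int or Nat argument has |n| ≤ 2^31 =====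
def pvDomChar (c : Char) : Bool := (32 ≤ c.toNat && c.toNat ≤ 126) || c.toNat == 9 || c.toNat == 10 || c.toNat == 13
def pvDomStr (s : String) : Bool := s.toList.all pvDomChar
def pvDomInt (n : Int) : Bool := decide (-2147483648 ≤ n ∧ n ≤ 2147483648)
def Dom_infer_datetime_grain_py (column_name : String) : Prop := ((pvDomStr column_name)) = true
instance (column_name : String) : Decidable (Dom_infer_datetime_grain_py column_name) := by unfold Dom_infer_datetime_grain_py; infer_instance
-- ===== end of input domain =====

-- B replaces A's linear endswith scan over all suffix candidates by extracting the underscore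
-- tail once (rfind) and looking it up in a dict (objective: idiomatic).


-- ===== PORT A =====
-- A's dict literal `mapping`
def pvMappingA : PySem.Dict String String := PySem.Dict.ofList
  [("_year", "year"), ("_quarter", "quarter"), ("_month", "month"), ("_week", "week"),
   ("_day", "day"), ("_date", "day"), ("_hour", "hour"), ("_minute", "minute")]

-- A's `for suffix, grain in mapping.items(): if column_name.endswith(suffix): return grain`
def pvScanA (column_name : String) : List (String × String) → Option String
  | [] => none
  | (suffix, grain) :: rest =>
      if PySem.Str.endswith column_name suffix then some grain else pvScanA column_name rest

def infer_datetime_grain_py (column_name : String) : Option String :=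
  pvScanA column_name pvMappingA.items

-- ===== PORT B =====
-- B's module-level dict `_GRAIN_BY_TAIL`
def pvGrainByTail : PySem.Dict String String := PySem.Dict.ofList
  [("_year", "year"), ("_quarter", "quarter"), ("_month", "month"), ("_week", "week"),
   ("_day", "day"), ("_date", "day"), ("_hour", "hour"), ("_minute", "minute")]

def infer_datetime_grain_py_alt (column_name : String) : Option String :=
  let idx := PySem.Str.rfind column_name "_"
  if idx == -1 then none
  else pvGrainByTail.get? (PySem.Str.slice column_name (some idx) none)

-- ===== PRECONDITION & SPEC =====
def Spec_infer_datetime_grain_py (column_name : String) (out : Option String) : Prop := out = infer_datetime_grain_py_alt column_name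
instance (column_name : String) (out : Option String) : Decidable (Spec_infer_datetime_grain_py column_name out) := by unfold Spec_infer_datetime_grain_py; infer_instance

-- ===== CLAIM (what is proved, stated in full; the proofs are below) =====
def Claim_equal_infer_datetime_grain_py : Prop := ∀ (column_name : String), Dom_infer_datetime_grain_py column_name → Spec_infer_datetime_grain_py column_name (infer_datetime_grain_py column_name)

-- ===== LEMMAS AND PROOFS =====

-- ['c'] is a prefix of l iff l starts with c
theorem pv_single_isPrefixOf (c : Char) (l : List Char) :
    (List.isPrefixOf [c] l) = true ↔ l[0]? = some c := by
  rw [List.isPrefixOf_iff_prefix]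
  cases l <;> simp [List.cons_prefix_iff, eq_comm]

-- the two unfolding equations of PySem.Chars.rfind.go
theorem pv_go_zero (s sub : List Char) :
    PySem.Chars.rfind.go s sub 0 = if sub.isPrefixOf s then 0 else -1 := by
  simp [PySem.Chars.rfind.go]

theorem pv_go_succ (s sub : List Char) (j : Nat) :
    PySem.Chars.rfind.go s sub (j+1)
      = if sub.isPrefixOf (s.drop (j+1)) then ((j:Int)+1) else PySem.Chars.rfind.go s sub j := by
  simp [PySem.Chars.rfind.go]

-- rfind.go returns -1 when no position ≤ n holds '_'
theorem pv_go_neg (s : List Char) (n : Nat)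
    (h : ∀ j : Nat, j ≤ n → s[j]? ≠ some '_') :
    PySem.Chars.rfind.go s ['_'] n = -1 := by
  induction n with
  | zero =>
      have h0 := h 0 (le_refl 0)
      have hpre : List.isPrefixOf ['_'] s = false := by
        rw [Bool.eq_false_iff]; intro hc; exact h0 ((pv_single_isPrefixOf _ _).mp hc)
      rw [pv_go_zero, if_neg (by simp [hpre])]
  | succ j ih =>
      have hj : s[j+1]? ≠ some '_' := h (j+1) (le_refl _)
      have hpre : List.isPrefixOf ['_'] (s.drop (j+1)) = false := by
        rw [Bool.eq_false_iff]
        intro hc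
        rw [pv_single_isPrefixOf] at hc
        rw [← List.head?_drop] at hj
        exact hj (by simpa [List.head?_eq_getElem?] using hc)
      rw [pv_go_succ, if_neg (by simp [hpre])]
      exact ih (fun i hi => h i (Nat.le_succ_of_le hi))

-- rfind.go returns k when s[k] = '_' and no later position ≤ n holds '_'
theorem pv_go_pos (s : List Char) (n k : Nat) (hkn : k ≤ n)
    (hk : s[k]? = some '_')
    (h : ∀ j : Nat, k < j → j ≤ n → s[j]? ≠ some '_') :
    PySem.Chars.rfind.go s ['_'] n = (k : Int) := by
  induction n with
  | zero =>
      have hk0 : k = 0 := Nat.le_zero.mp hkn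
      subst hk0
      have hpre : List.isPrefixOf ['_'] s = true := by
        rw [pv_single_isPrefixOf]; exact hk
      rw [pv_go_zero, if_pos hpre]; rfl
  | succ j ih =>
      by_cases hkj : k = j + 1
      · subst hkj
        have hpre : List.isPrefixOf ['_'] (s.drop (j+1)) = true := by
          rw [pv_single_isPrefixOf, List.getElem?_drop]
          simpa using hk
        rw [pv_go_succ, if_pos hpre]; push_cast; ring
      · have hk' : k ≤ j := by omega
        have hj : s[j+1]? ≠ some '_' := h (j+1) (by omega) (le_refl _)
        have hpre : List.isPrefixOf ['_'] (s.drop (j+1)) = false := by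
          rw [Bool.eq_false_iff]
          intro hc
          rw [pv_single_isPrefixOf] at hc
          rw [← List.head?_drop] at hj
          exact hj (by simpa [List.head?_eq_getElem?] using hc)
        rw [pv_go_succ, if_neg (by simp [hpre])]
        exact ih hk' (fun i hik hij => h i hik (Nat.le_succ_of_le hij))

-- any list containing '_' splits at its LAST '_'
theorem pv_exists_last_split (L : List Char) (h : '_' ∈ L) :
    ∃ p w, L = p ++ '_' :: w ∧ '_' ∉ w := by
  induction L with
  | nil => simp at h
  | cons c rest ih =>
      by_cases hr : '_' ∈ rest
      · obtain ⟨p, w, hpw, hw⟩ := ih hr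
        exact ⟨c :: p, w, by simp [hpw], hw⟩
      · have hc : c = '_' := by
          rcases List.mem_cons.mp h with h1 | h1
          · exact h1.symm
          · exact absurd h1 hr
        exact ⟨[], rest, by simp [hc], hr⟩

-- '_'-headed suffixes with underscore-free tails coincide
theorem pv_cons_suffix (a b : List Char) (hb : '_' ∉ b)
    (h : ('_' :: a) <:+ ('_' :: b)) : a = b := by
  obtain ⟨t, ht⟩ := h
  cases t with
  | nil => simpa using ht
  | cons c t' =>
      exfalso
      have : b = t' ++ '_' :: a := by
        have := ht
        simp at this
        exact this.2.symm
      exact hb (by simp [this])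

theorem pv_suffix_unique (p w wk : List Char) (hw : '_' ∉ w) (hwk : '_' ∉ wk) :
    (('_' :: wk) <:+ (p ++ '_' :: w)) ↔ wk = w := by
  constructor
  · intro h
    have h1 : ('_' :: w) <:+ (p ++ '_' :: w) := List.suffix_append p _
    rcases List.suffix_or_suffix_of_suffix h h1 with h2 | h2
    · exact pv_cons_suffix wk w hw h2
    · exact (pv_cons_suffix w wk hwk h2).symm
  · intro h; subst h; exact List.suffix_append p _

-- the endswith condition for a '_word' key, rephrased as equality with the '_'-tail
theorem pv_key_cond (s key : String) (p w wk : List Char)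
    (hL : s.toList = p ++ '_' :: w) (hw : '_' ∉ w)
    (hkey : key.toList = '_' :: wk) (hwk : '_' ∉ wk) :
    PySem.Str.endswith s key = (key == String.ofList ('_' :: w)) := by
  have h1 : PySem.Str.endswith s key = true ↔ wk = w := by
    rw [show PySem.Str.endswith s key = PySem.Chars.endswith s.toList key.toList from rfl,
        PySem.Chars.endswith_iff, hL, hkey]
    exact pv_suffix_unique p w wk hw hwk
  have h2 : (key == String.ofList ('_' :: w)) = true ↔ wk = w := by
    constructor
    · intro h
      have : key = String.ofList ('_' :: w) := by exact eq_of_beq h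
      have : key.toList = '_' :: w := by rw [this]; simp
      rw [hkey] at this
      exact (List.cons.inj this).2
    · intro h
      subst h
      have : key = String.ofList ('_' :: wk) := by
        apply String.toList_inj.mp
        simp [hkey]
      simp [this]
  by_cases hc : wk = w
  · rw [h2.mpr hc]; exact h1.mpr hc
  · rw [Bool.eq_false_iff.mpr (fun hh => hc (h2.mp hh))]
    exact Bool.eq_false_iff.mpr (fun hh => hc (h1.mp hh))

-- endswith is false for '_word' keys when s has no underscore
theorem pv_endswith_false (s key : String) (hs : '_' ∉ s.toList)
    (hk : '_' ∈ key.toList) : PySem.Str.endswith s key = false := by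
  rw [Bool.eq_false_iff]
  intro h
  rw [show PySem.Str.endswith s key = PySem.Chars.endswith s.toList key.toList from rfl,
      PySem.Chars.endswith_iff] at h
  exact hs (h.mem hk)

-- value of rfind at the last-underscore decomposition
theorem pv_rfind_eq (s : String) (p w : List Char)
    (hL : s.toList = p ++ '_' :: w) (hw : '_' ∉ w) :
    PySem.Str.rfind s "_" = (p.length : Int) := by
  rw [show PySem.Str.rfind s "_" = PySem.Chars.rfind s.toList ['_'] from rfl,
      show PySem.Chars.rfind s.toList ['_'] = PySem.Chars.rfind.go s.toList ['_'] s.toList.length from rfl]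
  apply pv_go_pos
  · rw [hL]; simp
  · rw [hL]
    rw [List.getElem?_append_right (le_refl _)]
    simp
  · intro j hj _ hc
    rw [hL] at hc
    rw [List.getElem?_append_right (by omega)] at hc
    rcases Nat.exists_eq_add_of_lt hj with ⟨d, hd⟩
    subst hd
    have hidx : p.length + d + 1 - p.length = d + 1 := by omega
    have hc' : ('_' :: w)[d + 1]? = some '_' := by
      rw [← hidx]; simpa using hc
    have : w[d]? = some '_' := by simpa using hc'
    exact hw (List.mem_of_getElem? this)

theorem pv_rfind_none (s : String) (hs : '_' ∉ s.toList) :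
    PySem.Str.rfind s "_" = -1 := by
  rw [show PySem.Str.rfind s "_" = PySem.Chars.rfind.go s.toList ['_'] s.toList.length from rfl]
  apply pv_go_neg
  intro j _ hc
  exact hs (List.mem_of_getElem? hc)

-- the key pair list shared by both dict literals
def pvPairs : List (String × String) :=
  [("_year", "year"), ("_quarter", "quarter"), ("_month", "month"), ("_week", "week"),
   ("_day", "day"), ("_date", "day"), ("_hour", "hour"), ("_minute", "minute")]

-- A's scan equals a first-match lookup once every endswith test is an equality with t
theorem pv_scan_eq_get (s t : String) : ∀ (l : List (String × String)),
    (∀ pr ∈ l, PySem.Str.endswith s pr.1 = (pr.1 == t)) →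
    pvScanA s l = Option.map (fun x => x.2) (List.find? (fun pr => pr.1 == t) l)
  | [], _ => rfl
  | (suffix, grain) :: rest, h => by
      have hh := h (suffix, grain) (List.mem_cons_self)
      have ht := pv_scan_eq_get s t rest (fun pr hpr => h pr (List.mem_cons_of_mem _ hpr))
      cases hb : (suffix == t) with
      | true =>
          have hh' : PySem.Chars.endswith s.toList suffix.toList = (suffix == t) := hh
          simp [pvScanA, hh', hb, List.find?]
      | false =>
          have hh' : PySem.Chars.endswith s.toList suffix.toList = (suffix == t) := hh
          simp [pvScanA, hh', hb, List.find?, ht]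

-- ===== VERDICT (by name: the statement is the Claim_ definition above) =====
theorem infer_datetime_grain_py_spec : Claim_equal_infer_datetime_grain_py := by
  intro s _
  unfold Spec_infer_datetime_grain_py infer_datetime_grain_py infer_datetime_grain_py_alt
  have hA : pvMappingA.items = pvPairs := by rfl
  by_cases h : '_' ∈ s.toList
  · obtain ⟨p, w, hL, hw⟩ := pv_exists_last_split s.toList h
    rw [pv_rfind_eq s p w hL hw]
    have hslice : PySem.Str.slice s (some (p.length : Int)) none = String.ofList ('_' :: w) := by
      rw [show PySem.Str.slice s (some (p.length : Int)) none
            = String.ofList (PySem.Chars.slice s.toList (some (p.length : Int)) none) from rfl]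
      congr 1
      rw [PySem.Chars.slice_eq_listSlice, PySem.List.slice_from_natCast, hL]
      simp
    have hne : (((p.length : Int)) == -1) = false := by
      rw [beq_eq_false_iff_ne]; omega
    simp only [hne, Bool.false_eq_true, if_false, hslice]
    have hB : pvGrainByTail.get? (String.ofList ('_' :: w))
        = Option.map (fun x => x.2)
            (List.find? (fun pr => pr.1 == String.ofList ('_' :: w)) pvPairs) := by rfl
    rw [hA, hB]
    apply pv_scan_eq_get
    intro pr hpr
    fin_cases hpr
    · exact pv_key_cond s "_year" p w "year".toList hL hw rfl (by decide)
    · exact pv_key_cond s "_quarter" p w "quarter".toList hL hw rfl (by decide)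
    · exact pv_key_cond s "_month" p w "month".toList hL hw rfl (by decide)
    · exact pv_key_cond s "_week" p w "week".toList hL hw rfl (by decide)
    · exact pv_key_cond s "_day" p w "day".toList hL hw rfl (by decide)
    · exact pv_key_cond s "_date" p w "date".toList hL hw rfl (by decide)
    · exact pv_key_cond s "_hour" p w "hour".toList hL hw rfl (by decide)
    · exact pv_key_cond s "_minute" p w "minute".toList hL hw rfl (by decide)
  · have e1 := pv_endswith_false s "_year" h (by decide)
    have e2 := pv_endswith_false s "_quarter" h (by decide)
    have e3 := pv_endswith_false s "_month" h (by decide)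
    have e4 := pv_endswith_false s "_week" h (by decide)
    have e5 := pv_endswith_false s "_day" h (by decide)
    have e6 := pv_endswith_false s "_date" h (by decide)
    have e7 := pv_endswith_false s "_hour" h (by decide)
    have e8 := pv_endswith_false s "_minute" h (by decide)
    have f1 : PySem.Chars.endswith s.toList ['_', 'y', 'e', 'a', 'r'] = false := by simpa using e1
    have f2 : PySem.Chars.endswith s.toList ['_', 'q', 'u', 'a', 'r', 't', 'e', 'r'] = false := by simpa using e2
    have f3 : PySem.Chars.endswith s.toList ['_', 'm', 'o', 'n', 't', 'h'] = false := by simpa using e3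
    have f4 : PySem.Chars.endswith s.toList ['_', 'w', 'e', 'e', 'k'] = false := by simpa using e4
    have f5 : PySem.Chars.endswith s.toList ['_', 'd', 'a', 'y'] = false := by simpa using e5
    have f6 : PySem.Chars.endswith s.toList ['_', 'd', 'a', 't', 'e'] = false := by simpa using e6
    have f7 : PySem.Chars.endswith s.toList ['_', 'h', 'o', 'u', 'r'] = false := by simpa using e7
    have f8 : PySem.Chars.endswith s.toList ['_', 'm', 'i', 'n', 'u', 't', 'e'] = false := by simpa using e8
    rw [hA, pv_rfind_none s h]
    simp [pvPairs, pvScanA, f1, f2, f3, f4, f5, f6, f7, f8]
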